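-- pv_equiv track=rewrite | github.com/anurag-saran-m/Python | String_method_custom_module (1).py | custom_title
-- ===== SOURCE A (Python) =====
-- def custom_title(string):
--     lst = string.split(' ')
--     for i in range(len(lst)):
--         is_first_alphabet='no'
--         x=lst[i]
--         s=''
--         for character in x:
--             if is_first_alphabet=='no':
--                 if 97 <= ord(character) <= 122:
--                     char = chr(ord(character)-32)
--                     s=s+char
--                     is_first_alphabet='yes'
--                 elif 65 <= ord(character) <= 90:
--                     s=s+character
--                     is_first_alphabet='yes'
--                 else:
--                     s=s+character
--             elif is_first_alphabet=='yes':
--                 if 97 <= ord(character) <= 122: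
--                     s=s+character
--                 elif 65 <= ord(character) <= 90:
--                     char = chr(ord(character)+32)
--                     s=s+char
--                 else:
--                     s=s+character
--         lst[i]=s
--     return ' '.join(lst)
-- ===== SOURCE B (Python) =====
-- def custom_title(string):
--     words = string.split(' ')
--     out = []
--     for w in words:
--         i = next((j for j, c in enumerate(w)
--                   if 'a' <= c <= 'z' or 'A' <= c <= 'Z'), None)
--         if i is None:
--             out.append(w)
--         else:
--             pivot = chr(ord(w[i]) - 32) if 'a' <= w[i] <= 'z' else w[i]
--             tail = ''.join(chr(ord(c) + 32) if 'A' <= c <= 'Z' else c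
--                            for c in w[i + 1:])
--             out.append(w[:i] + pivot + tail)
--     return ' '.join(out)
-- ===== Notes on version B (the rewrite author's own statement) =====
-- stated objective: alternative
-- what changed: Replaced A's per-word stateful character loop (a 'seen first letter' flag threaded through every character) by finding the index of the first ASCII letter and rebuilding the word as untouched prefix + uppercased pivot + tail with only A-Z lowercased.
import Mathlib
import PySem

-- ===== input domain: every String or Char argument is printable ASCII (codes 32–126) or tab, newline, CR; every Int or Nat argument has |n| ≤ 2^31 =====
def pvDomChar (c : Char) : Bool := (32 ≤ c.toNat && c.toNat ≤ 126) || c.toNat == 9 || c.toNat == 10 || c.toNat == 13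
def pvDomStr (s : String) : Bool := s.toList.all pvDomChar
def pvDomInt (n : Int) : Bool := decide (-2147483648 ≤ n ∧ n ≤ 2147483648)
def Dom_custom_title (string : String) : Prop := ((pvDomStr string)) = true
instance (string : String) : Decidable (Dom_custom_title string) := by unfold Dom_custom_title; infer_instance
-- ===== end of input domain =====

-- B replaces A's per-word stateful character loop by a find-first-letter index followed by
-- prefix / uppercased-pivot / lowercased-tail reconstruction (objective: alternative decomposition).

-- ===== PORT A =====
-- one step of A's inner 'for character in x' loop; state = (is_first_alphabet, s)
def ctA_step (st : Bool × List Char) (c : Char) : Bool × List Char :=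
  if st.1 = false then
    if 97 ≤ c.toNat ∧ c.toNat ≤ 122 then (true, st.2 ++ [Char.ofNat (c.toNat - 32)])
    else if 65 ≤ c.toNat ∧ c.toNat ≤ 90 then (true, st.2 ++ [c])
    else (false, st.2 ++ [c])
  else
    if 97 ≤ c.toNat ∧ c.toNat ≤ 122 then (true, st.2 ++ [c])
    else if 65 ≤ c.toNat ∧ c.toNat ≤ 90 then (true, st.2 ++ [Char.ofNat (c.toNat + 32)])
    else (true, st.2 ++ [c])

-- the outer loop rewrites lst[i] in place; ported as a map over the split words
def custom_title (string : String) : String :=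
  String.ofList (PySem.Chars.join [' ']
    ((PySem.Chars.splitOn string.toList [' ']).map
      (fun x => (x.foldl ctA_step (false, ([] : List Char))).2)))

-- ===== PORT B =====
def ctB_isLetter (c : Char) : Bool :=
  (97 ≤ c.toNat && c.toNat ≤ 122) || (65 ≤ c.toNat && c.toNat ≤ 90)

def ctB_low (c : Char) : Char :=
  if 65 ≤ c.toNat ∧ c.toNat ≤ 90 then Char.ofNat (c.toNat + 32) else c

-- per-word: first-letter index, then w[:i] ++ upper(w[i]) ++ map low w[i+1:]
-- (the slices w[:i], w[i], w[i+1:] use take/getD/drop: exact since 0 ≤ i < len w here)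
def ctB_word (w : List Char) : List Char :=
  match w.findIdx? ctB_isLetter with
  | none => w
  | some i =>
      let p := w.getD i ' '
      let pivot := if 97 ≤ p.toNat ∧ p.toNat ≤ 122 then Char.ofNat (p.toNat - 32) else p
      w.take i ++ [pivot] ++ (w.drop (i + 1)).map ctB_low

def custom_title_alt (string : String) : String :=
  String.ofList (PySem.Chars.join [' ']
    ((PySem.Chars.splitOn string.toList [' ']).map ctB_word))

-- ===== PRECONDITION & SPEC =====
def Spec_custom_title (string : String) (out : String) : Prop := out = custom_title_alt string
instance (string : String) (out : String) : Decidable (Spec_custom_title string out) := by unfold Spec_custom_title; infer_instance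

-- ===== CLAIM (what is proved, stated in full; the proofs are below) =====
def Claim_equal_custom_title : Prop := ∀ (string : String), Dom_custom_title string → Spec_custom_title string (custom_title string)

-- ===== LEMMAS AND PROOFS =====
-- after the first letter (flag = true) A just lowercases every remaining character
theorem ctA_fold_true (cs : List Char) : ∀ (s : List Char),
    (cs.foldl ctA_step (true, s)).2 = s ++ cs.map ctB_low := by
  induction cs with
  | nil => intro s; simp
  | cons c rest ih =>
      intro s
      simp only [List.foldl_cons, ctA_step, List.map_cons]
      rw [if_neg (by decide : ¬((true : Bool) = false))]
      by_cases h1 : 97 ≤ c.toNat ∧ c.toNat ≤ 122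
      · rw [if_pos h1, ih]
        simp only [ctB_low]
        rw [if_neg (by omega)]
        simp
      · rw [if_neg h1]
        by_cases h2 : 65 ≤ c.toNat ∧ c.toNat ≤ 90
        · rw [if_pos h2, ih]
          simp only [ctB_low]
          rw [if_pos h2]
          simp
        · rw [if_neg h2, ih]
          simp only [ctB_low]
          rw [if_neg h2]
          simp

-- before the first letter A copies characters; B's find-then-rebuild produces the same word
theorem ctA_fold_false (cs : List Char) : ∀ (s : List Char),
    (cs.foldl ctA_step (false, s)).2 = s ++ ctB_word cs := by
  induction cs with
  | nil => intro s; simp [ctB_word]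
  | cons c rest ih =>
      intro s
      simp only [List.foldl_cons, ctA_step]
      rw [if_pos trivial]
      by_cases hL : ctB_isLetter c = true
      · have hcons : (c :: rest).findIdx? ctB_isLetter = some 0 := by
          simp [List.findIdx?_cons, hL]
        by_cases h1 : 97 ≤ c.toNat ∧ c.toNat ≤ 122
        · rw [if_pos h1, ctA_fold_true]
          simp [ctB_word, hcons, h1]
        · have h2 : 65 ≤ c.toNat ∧ c.toNat ≤ 90 := by
            simp only [ctB_isLetter, Bool.or_eq_true, Bool.and_eq_true,
              decide_eq_true_eq] at hL
            omega
          rw [if_neg h1, if_pos h2, ctA_fold_true]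
          simp only [ctB_word, hcons, List.getD_cons_zero, List.take_zero,
            List.drop_succ_cons, List.drop_zero, List.nil_append]
          rw [if_neg h1]
          simp
      · have hN : ¬(97 ≤ c.toNat ∧ c.toNat ≤ 122) ∧ ¬(65 ≤ c.toNat ∧ c.toNat ≤ 90) := by
          simp only [ctB_isLetter, Bool.or_eq_true, Bool.and_eq_true,
            decide_eq_true_eq] at hL
          constructor <;> omega
        rw [if_neg hN.1, if_neg hN.2, ih]
        have hcons : (c :: rest).findIdx? ctB_isLetter
            = Option.map (fun i => i + 1) (rest.findIdx? ctB_isLetter) := by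
          simp [List.findIdx?_cons, hL]
        unfold ctB_word
        rw [hcons]
        cases hfi : rest.findIdx? ctB_isLetter with
        | none => simp
        | some j => simp

-- ===== VERDICT (by name: the statement is the Claim_ definition above) =====
theorem custom_title_spec : Claim_equal_custom_title := by
  intro string _
  unfold Spec_custom_title custom_title custom_title_alt
  refine congrArg String.ofList (congrArg (PySem.Chars.join [' ']) ?_)
  apply List.map_congr_left
  intro w _
  simpa using ctA_fold_false w []
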